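-- pv_equiv track=rewrite | github.com/suresh-vuppala/interview-ignite-lab | src/data/courses/dsa/stacks/stack-advanced/sort-stack/code/python/sort_stack.py | sortStackWithTemp
-- ===== SOURCE A (Python) =====
-- def sortStackWithTemp(stack):
--     temp = []
--
--     while stack:
--         # Pop element from input stack
--         current = stack.pop()
--
--         # Move elements from temp to input that are greater than current
--         while temp and temp[-1] > current:
--             stack.append(temp.pop())
--
--         # Push current to temp in sorted position
--         temp.append(current)
--
--     # Transfer back to original stack
--     while temp:
--         stack.append(temp.pop())
--
--     return stack
-- ===== SOURCE B (Python) =====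
-- def sortStackWithTemp(stack):
--     # Selection sort: repeatedly extract the maximum of the remaining elements,
--     # building the descending result; then rewrite the input list in place.
--     result = []
--     remaining = list(stack)
--     while remaining:
--         m = remaining[0]
--         for x in remaining:
--             if x > m:
--                 m = x
--         remaining.remove(m)
--         result.append(m)
--     stack.clear()
--     stack.extend(result)
--     return stack
-- ===== Notes on version B (the rewrite author's own statement) =====
-- stated objective: alternative
-- what changed: Insertion sort via an auxiliary temp stack replaced by a selection sort that repeatedly scans for and removes the maximum, then rewrites the input list in place with the descending result.
import Mathlib
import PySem

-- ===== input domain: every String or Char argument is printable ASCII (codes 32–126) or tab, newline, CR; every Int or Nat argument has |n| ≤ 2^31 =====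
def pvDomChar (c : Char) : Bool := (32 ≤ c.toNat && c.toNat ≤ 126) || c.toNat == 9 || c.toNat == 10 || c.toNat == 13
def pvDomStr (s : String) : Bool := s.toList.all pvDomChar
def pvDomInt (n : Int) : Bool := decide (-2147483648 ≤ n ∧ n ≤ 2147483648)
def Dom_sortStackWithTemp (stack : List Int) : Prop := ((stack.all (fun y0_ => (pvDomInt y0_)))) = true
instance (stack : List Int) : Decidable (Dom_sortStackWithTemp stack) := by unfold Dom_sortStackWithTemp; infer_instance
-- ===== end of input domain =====

-- B replaces A's temp-stack insertion sort by a scan-for-maximum selection sort (alternative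
-- decomposition, same O(n^2) cost); both mutate the argument list in place to the same final
-- state, so the proved return-value equality also reflects the matching side effect.

-- ===== PORT A =====
-- Stacks are held top-at-head during the loops (Python's list end = Lean head); the initial
-- `stack.reverse` and the final transfer restore Python's bottom-to-top list order.

-- number of ascending pairs (i<j with l[i] < l[j]); termination measure only
def pvInv : List Int → Nat
  | [] => 0
  | x :: xs => xs.countP (fun y => decide (x < y)) + pvInv xs

-- inner while: move elements from temp back to stack while temp's top > current
def pvInner : List Int → List Int → Int → List Int × List Int
  | stack, [], _ => (stack, [])
  | stack, t :: rest, current =>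
    if t > current then pvInner (t :: stack) rest current
    else (stack, t :: rest)

theorem pvInv_swap (w : List Int) (c t : Int) (v : List Int) (h : c < t) :
    pvInv (w ++ t :: c :: v) + 1 = pvInv (w ++ c :: t :: v) := by
  induction w with
  | nil =>
    simp only [List.nil_append, pvInv, List.countP_cons]
    have h1 : decide (t < c) = false := by simp; omega
    have h2 : decide (c < t) = true := by simpa using h
    simp [h1, h2]; omega
  | cons a w ih =>
    simp only [List.cons_append, pvInv]
    have : (w ++ t :: c :: v).countP (fun y => decide (a < y)) =
        (w ++ c :: t :: v).countP (fun y => decide (a < y)) := by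
      simp [List.countP_append, List.countP_cons]; omega
    omega

theorem pvInner_measure (temp : List Int) : ∀ (stack : List Int) (c : Int),
    pvInv ((pvInner stack temp c).1.reverse ++ (c :: (pvInner stack temp c).2))
      + (pvInner stack temp c).1.length
      < pvInv (stack.reverse ++ (c :: temp)) + stack.length + 1 := by
  induction temp with
  | nil => intro stack c; simp [pvInner]
  | cons t rest ih =>
    intro stack c
    by_cases h : t > c
    · have := ih (t :: stack) c
      simp only [pvInner, if_pos h] at *
      have hsw := pvInv_swap stack.reverse c t rest h
      simp only [List.reverse_cons, List.append_assoc, List.cons_append, List.nil_append,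
        List.length_cons] at *
      omega
    · simp [pvInner, if_neg h]

-- outer while: pop current, run the inner while, push current to temp; when the stack is
-- empty, the final while transfers temp back (pvTransfer builds the returned Python list)
def pvTransfer : List Int → List Int → List Int
  | [], stack => stack
  | t :: rest, stack => pvTransfer rest (stack ++ [t])

def pvOuter : List Int → List Int → List Int
  | [], temp => pvTransfer temp []
  | c :: rest, temp =>
    let p := pvInner rest temp c
    pvOuter p.1 (c :: p.2)
termination_by stack temp => pvInv (stack.reverse ++ temp) + stack.length
decreasing_by
  have := pvInner_measure temp rest c
  simp only [List.reverse_cons, List.append_assoc, List.cons_append, List.nil_append,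
    List.length_cons] at *
  omega

def sortStackWithTemp (stack : List Int) : List Int := pvOuter stack.reverse []

-- ===== PORT B =====
-- selection sort: m = remaining[0]; for x in remaining: if x > m: m = x
def pvMaxLoop : Int → List Int → Int
  | m, [] => m
  | m, x :: xs => pvMaxLoop (if x > m then x else m) xs

-- remaining.remove(m) (m is always present, so no error case arises)
def pvRemoveFirst (m : Int) : List Int → List Int
  | [] => []
  | x :: xs => if x = m then xs else x :: pvRemoveFirst m xs

theorem pvRemoveFirst_eq_erase (m : Int) (l : List Int) : pvRemoveFirst m l = l.erase m := by
  induction l with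
  | nil => rfl
  | cons x xs ih =>
    by_cases h : x = m
    · simp [pvRemoveFirst, h]
    · simp [pvRemoveFirst, h, ih]

theorem pvMaxLoop_mem (l : List Int) : ∀ m, pvMaxLoop m l ∈ m :: l := by
  induction l with
  | nil => intro m; simp [pvMaxLoop]
  | cons x xs ih =>
    intro m
    by_cases h : x > m
    · have := ih x; simp [pvMaxLoop, if_pos h] at *; tauto
    · have := ih m; simp [pvMaxLoop, if_neg h] at *; tauto

theorem pvRemoveFirst_length (m : Int) (l : List Int) (h : m ∈ l) :
    (pvRemoveFirst m l).length < l.length := by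
  rw [pvRemoveFirst_eq_erase, List.length_erase_of_mem h]
  have : l.length ≠ 0 := by simp [List.length_eq_zero_iff]; rintro rfl; simp at h
  omega

def pvSelect : List Int → List Int
  | [] => []
  | x :: xs =>
    let m := pvMaxLoop x (x :: xs)
    m :: pvSelect (pvRemoveFirst m (x :: xs))
termination_by l => l.length
decreasing_by
  refine pvRemoveFirst_length _ _ ?_
  have := pvMaxLoop_mem (x :: xs) x
  simp at this
  rcases this with h | h <;> simp [h]

-- result = descending selection; Source B then rewrites `stack` in place to this list and returns it
def sortStackWithTemp_alt (stack : List Int) : List Int := pvSelect stack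

-- ===== PRECONDITION & SPEC =====
def Spec_sortStackWithTemp (stack : List Int) (out : List Int) : Prop := out = sortStackWithTemp_alt stack
instance (stack : List Int) (out : List Int) : Decidable (Spec_sortStackWithTemp stack out) := by unfold Spec_sortStackWithTemp; infer_instance

-- ===== CLAIM (what is proved, stated in full; the proofs are below) =====
def Claim_equal_sortStackWithTemp : Prop := ∀ (stack : List Int), Dom_sortStackWithTemp stack → Spec_sortStackWithTemp stack (sortStackWithTemp stack)

-- ===== LEMMAS AND PROOFS =====

theorem pvTransfer_eq (temp : List Int) : ∀ acc, pvTransfer temp acc = acc ++ temp := by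
  induction temp with
  | nil => simp [pvTransfer]
  | cons t rest ih => intro acc; simp [pvTransfer, ih]

theorem pvInner_eq (temp : List Int) : ∀ (stack : List Int) (c : Int),
    pvInner stack temp c =
      ((temp.takeWhile (fun t => decide (c < t))).reverse ++ stack,
        temp.dropWhile (fun t => decide (c < t))) := by
  induction temp with
  | nil => intro stack c; simp [pvInner]
  | cons t rest ih =>
    intro stack c
    by_cases h : t > c
    · simp [pvInner, if_pos h, ih, (by simpa using h : decide (c < t) = true)]
    · simp [pvInner, if_neg h, (by simp; omega : decide (c < t) = false)]

theorem pvOuter_perm (stack temp : List Int) : (pvOuter stack temp).Perm (stack ++ temp) := by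
  induction stack, temp using pvOuter.induct with
  | case1 temp => simp [pvOuter, pvTransfer_eq]
  | case2 c rest temp p ih =>
    have hp : p = pvInner rest temp c := rfl
    rw [pvOuter]
    show (pvOuter p.1 (c :: p.2)).Perm ((c :: rest) ++ temp)
    rw [hp, pvInner_eq] at ih ⊢
    refine ih.trans ?_
    rw [List.perm_iff_count]
    intro a
    have htd := List.takeWhile_append_dropWhile (p := fun t => decide (c < t)) (l := temp)
    have hsplit : temp.count a = (temp.takeWhile (fun t => decide (c < t))).count a
        + (temp.dropWhile (fun t => decide (c < t))).count a := by
      have h2 := congrArg (List.count a) htd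
      rw [List.count_append] at h2
      omega
    simp only [List.count_append, List.count_cons, List.count_reverse, List.cons_append]
    omega

theorem pairwise_cons_dropWhile (temp : List Int) (c : Int)
    (h : temp.Pairwise (· ≥ ·)) :
    (c :: temp.dropWhile (fun t => decide (c < t))).Pairwise (· ≥ ·) := by
  induction temp with
  | nil => simp
  | cons t ts ih =>
    by_cases hc : c < t
    · rw [List.dropWhile_cons_of_pos (by simpa using hc)]
      exact ih h.tail
    · rw [List.dropWhile_cons_of_neg (by simpa using hc)]
      refine List.Pairwise.cons ?_ h
      intro y hy
      rcases hy with _ | hy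
      · omega
      · have := (List.pairwise_cons.mp h).1 y (by assumption)
        omega

theorem pvOuter_sorted (stack temp : List Int) (h : temp.Pairwise (· ≥ ·)) :
    (pvOuter stack temp).Pairwise (· ≥ ·) := by
  induction stack, temp using pvOuter.induct with
  | case1 temp => simpa [pvOuter, pvTransfer_eq] using h
  | case2 c rest temp p ih =>
    have hp : p = pvInner rest temp c := rfl
    rw [pvOuter]
    show (pvOuter p.1 (c :: p.2)).Pairwise (· ≥ ·)
    apply ih
    rw [hp, pvInner_eq]
    exact pairwise_cons_dropWhile temp c h

theorem pvMaxLoop_ge (l : List Int) : ∀ m, m ≤ pvMaxLoop m l ∧ ∀ x ∈ l, x ≤ pvMaxLoop m l := by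
  induction l with
  | nil => intro m; simp [pvMaxLoop]
  | cons x xs ih =>
    intro m
    by_cases h : x > m
    · have := ih x
      simp only [pvMaxLoop, if_pos h]
      refine ⟨by omega, ?_⟩
      intro y hy
      rcases hy with _ | hy
      · exact this.1
      · exact this.2 y (by assumption)
    · have := ih m
      simp only [pvMaxLoop, if_neg h]
      refine ⟨this.1, ?_⟩
      intro y hy
      rcases hy with _ | hy
      · omega
      · exact this.2 y (by assumption)

theorem pvMaxLoop_self_mem (x : Int) (xs : List Int) : pvMaxLoop x (x :: xs) ∈ x :: xs := by
  have := pvMaxLoop_mem (x :: xs) x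
  simp at this
  rcases this with h | h <;> simp [h]

theorem pvSelect_perm (l : List Int) : (pvSelect l).Perm l := by
  induction l using pvSelect.induct with
  | case1 => simp [pvSelect]
  | case2 x xs m ih =>
    have hm : m = pvMaxLoop x (x :: xs) := rfl
    rw [pvSelect]
    show (m :: pvSelect (pvRemoveFirst m (x :: xs))).Perm (x :: xs)
    rw [hm, pvRemoveFirst_eq_erase] at ih ⊢
    exact (ih.cons _).trans (List.perm_cons_erase (pvMaxLoop_self_mem x xs)).symm

theorem pvSelect_sorted (l : List Int) : (pvSelect l).Pairwise (· ≥ ·) := by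
  induction l using pvSelect.induct with
  | case1 => simp [pvSelect]
  | case2 x xs m ih =>
    have hm : m = pvMaxLoop x (x :: xs) := rfl
    rw [pvSelect]
    show (m :: pvSelect (pvRemoveFirst m (x :: xs))).Pairwise (· ≥ ·)
    rw [hm] at ih ⊢
    refine List.Pairwise.cons ?_ ih
    intro y hy
    have hy1 : y ∈ pvRemoveFirst (pvMaxLoop x (x :: xs)) (x :: xs) :=
      (pvSelect_perm _).mem_iff.mp hy
    rw [pvRemoveFirst_eq_erase] at hy1
    have hy2 : y ∈ x :: xs := List.mem_of_mem_erase hy1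
    have := (pvMaxLoop_ge (x :: xs) x).2 y hy2
    omega

-- ===== VERDICT (by name: the statement is the Claim_ definition above) =====
theorem sortStackWithTemp_spec : Claim_equal_sortStackWithTemp := by
  intro stack _
  unfold Spec_sortStackWithTemp sortStackWithTemp sortStackWithTemp_alt
  have pa := pvOuter_perm stack.reverse []
  rw [List.append_nil] at pa
  replace pa := pa.trans (List.reverse_perm stack)
  have pb : (pvSelect stack).Perm stack := pvSelect_perm stack
  exact @List.Perm.eq_of_pairwise' _ _ ⟨fun _ _ h1 h2 => le_antisymm h2 h1⟩ _ _
    (pvOuter_sorted stack.reverse [] (by simp)) (pvSelect_sorted stack) (pa.trans pb.symm)
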